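-- pv_equiv track=rewrite | github.com/Al3xBlack0ut/TSP | test.py | dpx
-- ===== SOURCE A (Python) =====
-- def dpx(parent1, parent2):
--     size = len(parent1)
--     common_subpaths = []
--     i = 0
--     while i < size:
--         if parent1[i] == parent2[i]:
--             start = i
--             while i < size and parent1[i] == parent2[i]:
--                 i += 1
--             common_subpaths.append((start, i))
--         i += 1
--
--     child = [-1] * size
--     for start, end in common_subpaths:
--         for i in range(start, end):
--             child[i] = parent1[i]
--
--     def find_next_node(remaining_nodes, current_node):
--         for node in remaining_nodes:
--             if node != -1:
--                 return node
--         return -1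
--
--     remaining_nodes1 = [-1 if node in child else node for node in parent1]
--     remaining_nodes2 = [-1 if node in child else node for node in parent2]
--     current_node = find_next_node(remaining_nodes1, -1)
--     for i in range(size):
--         if child[i] == -1:
--             if current_node in remaining_nodes1:
--                 child[i] = current_node
--                 remaining_nodes1[remaining_nodes1.index(current_node)] = -1
--                 current_node = find_next_node(remaining_nodes1, current_node)
--             else:
--                 child[i] = current_node
--                 remaining_nodes2[remaining_nodes2.index(current_node)] = -1
--                 current_node = find_next_node(remaining_nodes2, current_node)
--
--     return child
-- ===== SOURCE B (Python) =====
-- def dpx(parent1, parent2):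
--     # Direct characterization instead of A's two-list greedy simulation: holes are filled,
--     # left to right, with the parent1 values not fixed by a common position (each occurrence,
--     # in parent1 order), padded with -1 when the stream runs out. A's current node is always
--     # drawn from remaining_nodes1, so its remaining_nodes2 branch is dead code and the fill
--     # sequence is exactly this stream.
--     child = [a if a == b else -1 for a, b in zip(parent1, parent2)]
--     blocked = set(child)
--     fillers = [v for v in parent1 if v != -1 and v not in blocked]
--     out = []
--     k = 0
--     for c in child:
--         if c != -1:
--             out.append(c)
--         elif k < len(fillers):
--             out.append(fillers[k])
--             k += 1
--         else:
--             out.append(-1)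
--     return out
-- ===== Notes on version B (the rewrite author's own statement) =====
-- stated objective: faster
-- what changed: B drops A's greedy two-remaining-list simulation (find_next_node, membership tests, index removals) entirely: since A's current node is always drawn from remaining_nodes1, its remaining_nodes2 branch is dead code and the hole-fill sequence is exactly the parent1 values not blocked by a common position, in order, padded with -1 - so B builds the child by one zip pass, one filtered fill stream, and one left-to-right fill, with no simulation loop.
import Mathlib
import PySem

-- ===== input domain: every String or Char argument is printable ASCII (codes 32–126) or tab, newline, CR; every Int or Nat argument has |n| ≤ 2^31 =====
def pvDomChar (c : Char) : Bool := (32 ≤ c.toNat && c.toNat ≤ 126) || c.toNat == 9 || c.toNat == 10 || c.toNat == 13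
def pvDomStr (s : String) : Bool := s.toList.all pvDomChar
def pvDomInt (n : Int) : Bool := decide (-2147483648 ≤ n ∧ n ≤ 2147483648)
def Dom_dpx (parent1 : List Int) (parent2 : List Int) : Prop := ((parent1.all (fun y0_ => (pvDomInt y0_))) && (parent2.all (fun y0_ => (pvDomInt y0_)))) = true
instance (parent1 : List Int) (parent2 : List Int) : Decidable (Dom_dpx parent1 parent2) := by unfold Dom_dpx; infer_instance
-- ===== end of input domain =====

-- B replaces A's greedy two-remaining-list simulation by its direct characterization:
-- the holes receive the unblocked parent1 values in order, padded with -1 (asymptotically faster).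

-- ===== PORT A =====
-- inner while of A's common-subpath scan: first index ≥ i where the parents disagree (or size)
def dpxInner (p1 p2 : List Int) (size i : Nat) : Nat :=
  if _h : i < size then
    if p1.getD i 0 == p2.getD i 0 then dpxInner p1 p2 size (i + 1) else i
  else i
termination_by size - i

-- needed by dpxRuns's termination (cited in its decreasing_by)
theorem dpxInner_ge (p1 p2 : List Int) (size i : Nat) : i ≤ dpxInner p1 p2 size i := by
  unfold dpxInner
  split
  · split
    · have := dpxInner_ge p1 p2 size (i + 1); omega
    · exact le_refl _
  · exact le_refl _
termination_by size - i

-- outer while: the list of (start, end) common subpaths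
def dpxRuns (p1 p2 : List Int) (size i : Nat) : List (Nat × Nat) :=
  if _h : i < size then
    if p1.getD i 0 == p2.getD i 0 then
      (i, dpxInner p1 p2 size i) :: dpxRuns p1 p2 size (dpxInner p1 p2 size i + 1)
    else dpxRuns p1 p2 size (i + 1)
  else []
termination_by size - i
decreasing_by
  · have := dpxInner_ge p1 p2 size i; omega
  · omega

-- for i in range(start, end): child[i] = parent1[i]
def dpxFill (p1 : List Int) (child : List Int) (r : Nat × Nat) : List Int :=
  (List.range' r.1 (r.2 - r.1)).foldl (fun c i => c.set i (p1.getD i 0)) child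

-- find_next_node (its second Python argument is unused by its body)
def dpxFindNext (l : List Int) : Int := (l.find? (fun v => v != -1)).getD (-1)

-- one iteration of A's final for-loop
def dpxStep (s : List Int × List Int × List Int × Int) (i : Nat) :
    List Int × List Int × List Int × Int :=
  match s with
  | (child, r1, r2, cur) =>
    if child.getD i 0 == -1 then
      if r1.contains cur then
        let r1' := match PySem.List.index? r1 cur with
          | some j => r1.set j (-1)
          | none => r1           -- unreachable when contains holds
        (child.set i cur, r1', r2, dpxFindNext r1')
      else
        let r2' := match PySem.List.index? r2 cur with
          | some j => r2.set j (-1)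
          | none => r2           -- Python would raise ValueError here; unreachable under Pre_
        (child.set i cur, r1, r2', dpxFindNext r2')
    else s

def dpx (parent1 : List Int) (parent2 : List Int) : List Int :=
  let size := parent1.length
  let child := (dpxRuns parent1 parent2 size 0).foldl (dpxFill parent1) (List.replicate size (-1))
  let r1 := parent1.map (fun v => if child.contains v then -1 else v)
  let r2 := parent2.map (fun v => if child.contains v then -1 else v)
  ((List.range size).foldl dpxStep (child, r1, r2, dpxFindNext r1)).1

-- ===== PORT B =====
-- the left-to-right fill: agreed positions kept, holes consume the filler stream, then -1
def dpxFillB : List Int → List Int → List Int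
  | [], _ => []
  | c :: cs, fs =>
    if c != -1 then c :: dpxFillB cs fs
    else
      match fs with
      | [] => (-1) :: dpxFillB cs []
      | f :: fs' => f :: dpxFillB cs fs'

def dpx_alt (parent1 : List Int) (parent2 : List Int) : List Int :=
  let child := (parent1.zip parent2).map (fun ab => if ab.1 == ab.2 then ab.1 else -1)
  let blocked := PySem.Set.ofList child
  let fillers := parent1.filter (fun v => v != -1 && !(PySem.Set.contains blocked v))
  dpxFillB child fillers

-- ===== PRECONDITION & SPEC =====
-- Pre_ excludes exactly the inputs where A raises: len(parent2) < len(parent1) makes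
-- parent1[i] == parent2[i] hit an IndexError on parent2.
def Pre_dpx (parent1 : List Int) (parent2 : List Int) : Prop := parent1.length ≤ parent2.length
instance (parent1 : List Int) (parent2 : List Int) : Decidable (Pre_dpx parent1 parent2) := by
  unfold Pre_dpx; infer_instance
def pvWitness_dpx : List Int × List Int := ([1, 2, 3], [1, 3, 2])

def Spec_dpx (parent1 : List Int) (parent2 : List Int) (out : List Int) : Prop :=
  out = dpx_alt parent1 parent2
instance (parent1 : List Int) (parent2 : List Int) (out : List Int) :
    Decidable (Spec_dpx parent1 parent2 out) := by unfold Spec_dpx; infer_instance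

-- ===== CLAIM (what is proved, stated in full; the proofs are below) =====
def Claim_equal_dpx : Prop := ∀ (parent1 : List Int) (parent2 : List Int),
  Dom_dpx parent1 parent2 → Pre_dpx parent1 parent2 → Spec_dpx parent1 parent2 (dpx parent1 parent2)

-- ===== LEMMAS AND PROOFS =====

theorem getD_set' (l : List Int) (j k : Nat) (x d : Int) :
    (l.set j x).getD k d = if j = k ∧ j < l.length then x else l.getD k d := by
  rw [List.getD_eq_getElem?_getD, List.getD_eq_getElem?_getD, List.getElem?_set]
  by_cases hjk : j = k
  · subst hjk
    by_cases hl : j < l.length <;> simp [hl]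
  · simp [hjk]

theorem set_getD_self (l : List Int) (j : Nat) (h : j < l.length) :
    l.set j (l.getD j 0) = l := by
  apply List.ext_getElem
  · simp
  · intro k h1 h2
    rw [List.getElem_set]
    split
    · next he => subst he; rw [List.getD_eq_getElem l 0 h]
    · rfl

theorem dpxInner_le (p1 p2 : List Int) (size i : Nat) (h : i ≤ size) :
    dpxInner p1 p2 size i ≤ size := by
  unfold dpxInner
  split
  · split
    · exact dpxInner_le p1 p2 size (i + 1) (by omega)
    · exact h
  · exact h
termination_by size - i

theorem dpxInner_common (p1 p2 : List Int) (size i : Nat) :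
    ∀ k, i ≤ k → k < dpxInner p1 p2 size i → p1.getD k 0 = p2.getD k 0 := by
  intro k hk1 hk2
  unfold dpxInner at hk2
  split at hk2
  · next hi =>
    split at hk2
    · next hc =>
      rcases Nat.lt_or_ge k (i + 1) with h' | h'
      · have : k = i := by omega
        subst this
        simpa using hc
      · exact dpxInner_common p1 p2 size (i + 1) k h' hk2
    · omega
  · omega
termination_by size - i

theorem dpxInner_step (p1 p2 : List Int) (size i : Nat) (hi : i < size)
    (hc : p1.getD i 0 = p2.getD i 0) :
    dpxInner p1 p2 size i = dpxInner p1 p2 size (i + 1) := by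
  conv_lhs => unfold dpxInner
  rw [dif_pos hi, if_pos (by simpa using hc)]

theorem dpxInner_id (p1 p2 : List Int) (size i : Nat)
    (h : ¬(i < size ∧ p1.getD i 0 = p2.getD i 0)) :
    dpxInner p1 p2 size i = i := by
  conv_lhs => unfold dpxInner
  by_cases hi : i < size
  · rw [dif_pos hi, if_neg (by simpa using fun hc => h ⟨hi, hc⟩)]
  · rw [dif_neg hi]

theorem dpxInner_stop (p1 p2 : List Int) (size i : Nat)
    (h : dpxInner p1 p2 size i < size) :
    ¬ p1.getD (dpxInner p1 p2 size i) 0 = p2.getD (dpxInner p1 p2 size i) 0 := by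
  by_cases hi : i < size
  · by_cases hc : p1.getD i 0 = p2.getD i 0
    · rw [dpxInner_step p1 p2 size i hi hc] at h ⊢
      exact dpxInner_stop p1 p2 size (i + 1) h
    · rw [dpxInner_id p1 p2 size i (by tauto)] at h ⊢
      exact hc
  · rw [dpxInner_id p1 p2 size i (by tauto)] at h ⊢
    exact absurd h hi
termination_by size - i

theorem foldl_set_length (p1 : List Int) (idxs : List Nat) (c : List Int) :
    (idxs.foldl (fun c k => c.set k (p1.getD k 0)) c).length = c.length := by
  induction idxs generalizing c with
  | nil => rfl
  | cons a t ih => rw [List.foldl_cons, ih, List.length_set]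

theorem fill_length (p1 : List Int) (c : List Int) (r : Nat × Nat) :
    (dpxFill p1 c r).length = c.length := by
  unfold dpxFill
  exact foldl_set_length p1 _ c

theorem fill_getD (p1 : List Int) (c : List Int) (s e j : Nat) (he : e ≤ c.length) :
    ((List.range' s (e - s)).foldl (fun c k => c.set k (p1.getD k 0)) c).getD j 0 =
      if s ≤ j ∧ j < e then p1.getD j 0 else c.getD j 0 := by
  by_cases hse : e ≤ s
  · have : e - s = 0 := by omega
    rw [this]
    simp only [List.range'_zero, List.foldl_nil]
    rw [if_neg (by omega)]
  · have h1 : e - s = (e - (s + 1)) + 1 := by omega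
    rw [h1, List.range'_succ, List.foldl_cons]
    rw [fill_getD p1 (c.set s (p1.getD s 0)) (s + 1) e j (by rw [List.length_set]; exact he)]
    rw [getD_set']
    by_cases hj : s ≤ j ∧ j < e
    · rw [if_pos hj]
      by_cases hj1 : s + 1 ≤ j ∧ j < e
      · rw [if_pos hj1]
      · have hsj : s = j := by omega
        rw [if_neg hj1, if_pos ⟨hsj, by omega⟩, hsj]
    · rw [if_neg hj, if_neg (by omega), if_neg (by omega)]
termination_by e - s

theorem runs_getD (p1 p2 : List Int) (size i : Nat) (base : List Int) (j : Nat)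
    (hb : base.length = size) :
    ((dpxRuns p1 p2 size i).foldl (dpxFill p1) base).getD j 0 =
      if i ≤ j ∧ j < size ∧ p1.getD j 0 = p2.getD j 0 then p1.getD j 0
      else base.getD j 0 := by
  unfold dpxRuns
  split
  · next hi =>
    split
    · next hc =>
      have hcom : p1.getD i 0 = p2.getD i 0 := by simpa using hc
      have hle : dpxInner p1 p2 size i ≤ size := dpxInner_le p1 p2 size i (by omega)
      have hge : i ≤ dpxInner p1 p2 size i := dpxInner_ge p1 p2 size i
      rw [List.foldl_cons]
      rw [runs_getD p1 p2 size (dpxInner p1 p2 size i + 1) (dpxFill p1 base (i, dpxInner p1 p2 size i)) j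
        (by rw [fill_length]; exact hb)]
      have hfg : (dpxFill p1 base (i, dpxInner p1 p2 size i)).getD j 0 =
          if i ≤ j ∧ j < dpxInner p1 p2 size i then p1.getD j 0 else base.getD j 0 := by
        unfold dpxFill
        exact fill_getD p1 base i (dpxInner p1 p2 size i) j (by omega)
      rw [hfg]
      have hint : ∀ k, i ≤ k → k < dpxInner p1 p2 size i → p1.getD k 0 = p2.getD k 0 :=
        dpxInner_common p1 p2 size i
      have hstop : dpxInner p1 p2 size i < size →
          ¬ p1.getD (dpxInner p1 p2 size i) 0 = p2.getD (dpxInner p1 p2 size i) 0 :=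
        dpxInner_stop p1 p2 size i
      by_cases hB : i ≤ j ∧ j < dpxInner p1 p2 size i
      · rw [if_neg (fun hA => absurd hA.1 (by omega)), if_pos hB,
          if_pos ⟨hB.1, by omega, hint j hB.1 hB.2⟩]
      · by_cases hA : dpxInner p1 p2 size i + 1 ≤ j ∧ j < size ∧ p1.getD j 0 = p2.getD j 0
        · rw [if_pos hA, if_pos ⟨by omega, hA.2⟩]
        · rw [if_neg hA, if_neg hB, if_neg (fun hC => by
            have hd1 : dpxInner p1 p2 size i ≤ j := by
              by_contra hx
              exact hB ⟨hC.1, by omega⟩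
            have hd2 : j ≤ dpxInner p1 p2 size i := by
              by_contra hx
              exact hA ⟨by omega, hC.2.1, hC.2.2⟩
            have hje : j = dpxInner p1 p2 size i := by omega
            exact hstop (hje ▸ hC.2.1) (hje ▸ hC.2.2))]
    · next hc =>
      rw [runs_getD p1 p2 size (i + 1) base j hb]
      have hnc : ¬ p1.getD i 0 = p2.getD i 0 := by simpa using hc
      by_cases hA : i + 1 ≤ j ∧ j < size ∧ p1.getD j 0 = p2.getD j 0
      · rw [if_pos hA, if_pos ⟨by omega, hA.2⟩]
      · rw [if_neg hA, if_neg (fun hC => by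
          have : j = i := by
            by_contra hx
            exact hA ⟨by omega, hC.2.1, hC.2.2⟩
          exact hnc (this ▸ hC.2.2))]
  · next hi =>
    rw [List.foldl_nil, if_neg (by omega)]
termination_by size - i
decreasing_by
  · have := dpxInner_ge p1 p2 size i; omega
  · omega

theorem runs_length (p1 : List Int) (runs : List (Nat × Nat)) (base : List Int) :
    (runs.foldl (dpxFill p1) base).length = base.length := by
  induction runs generalizing base with
  | nil => rfl
  | cons r t ih => rw [List.foldl_cons, ih, fill_length]

theorem child_eq (p1 p2 : List Int) (hpre : p1.length ≤ p2.length) :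
    (dpxRuns p1 p2 p1.length 0).foldl (dpxFill p1) (List.replicate p1.length (-1)) =
      (p1.zip p2).map (fun ab => if ab.1 == ab.2 then ab.1 else -1) := by
  have hlen1 : ((dpxRuns p1 p2 p1.length 0).foldl (dpxFill p1)
      (List.replicate p1.length (-1))).length = p1.length := by
    rw [runs_length, List.length_replicate]
  have hlen2 : ((p1.zip p2).map (fun ab => if ab.1 == ab.2 then ab.1 else -1)).length
      = p1.length := by
    rw [List.length_map, List.length_zip]
    omega
  apply List.ext_getElem (by rw [hlen1, hlen2])
  intro j hj1 hj2
  rw [← List.getD_eq_getElem _ 0 hj1, ← List.getD_eq_getElem _ 0 hj2]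
  rw [runs_getD p1 p2 p1.length 0 _ j (List.length_replicate)]
  have hjl : j < p1.length := by rw [hlen1] at hj1; exact hj1
  have hjl2 : j < p2.length := by omega
  have hrhs : ((p1.zip p2).map (fun ab => if ab.1 == ab.2 then ab.1 else -1)).getD j 0
      = if p1.getD j 0 == p2.getD j 0 then p1.getD j 0 else -1 := by
    rw [List.getD_eq_getElem _ 0 hj2, List.getElem_map, List.getElem_zip]
    rw [List.getD_eq_getElem _ 0 hjl, List.getD_eq_getElem _ 0 hjl2]
  rw [hrhs]
  by_cases hc : p1.getD j 0 = p2.getD j 0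
  · rw [if_pos ⟨Nat.zero_le j, hjl, hc⟩, if_pos (by simpa using hc)]
  · rw [if_neg (fun h => hc h.2.2), if_neg (by simpa using hc),
      List.getD_replicate _ hjl]

-- scan helper (proof-side only): first index ≥ p where l is not -1 (or l.length)
def dpxScan (l : List Int) (p : Nat) : Nat :=
  if _h : p < l.length then (if l.getD p 0 == -1 then dpxScan l (p + 1) else p) else p
termination_by l.length - p

theorem scan_ge (l : List Int) (p : Nat) : p ≤ dpxScan l p := by
  unfold dpxScan
  split
  · split
    · have := scan_ge l (p + 1); omega
    · exact le_refl _
  · exact le_refl _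
termination_by l.length - p

theorem scan_le (l : List Int) (p : Nat) (h : p ≤ l.length) : dpxScan l p ≤ l.length := by
  unfold dpxScan
  split
  · split
    · exact scan_le l (p + 1) (by omega)
    · exact h
  · exact h
termination_by l.length - p

theorem scan_mid (l : List Int) (p : Nat) :
    ∀ k, p ≤ k → k < dpxScan l p → l.getD k 0 = -1 := by
  intro k hk1 hk2
  unfold dpxScan at hk2
  split at hk2
  · next hp =>
    split at hk2
    · next hc =>
      rcases Nat.lt_or_ge k (p + 1) with h' | h'
      · have : k = p := by omega
        subst this
        simpa using hc
      · exact scan_mid l (p + 1) k h' hk2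
    · omega
  · omega
termination_by l.length - p

theorem scan_stop (l : List Int) (p : Nat) (h : dpxScan l p < l.length) :
    l.getD (dpxScan l p) 0 ≠ -1 := by
  unfold dpxScan at h ⊢
  split at h
  · next hp =>
    split at h
    · next hc =>
      simp only [hp, reduceDIte, hc, if_true]
      exact scan_stop l (p + 1) h
    · next hc =>
      simp only [hp, reduceDIte, hc, if_false]
      simpa using hc
  · next hp => exact absurd h hp
termination_by l.length - p

theorem findNext_nil : dpxFindNext [] = -1 := rfl

theorem findNext_cons_neg (t : List Int) : dpxFindNext ((-1) :: t) = dpxFindNext t := by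
  unfold dpxFindNext
  rw [List.find?_cons_of_neg (by simp)]

theorem findNext_cons_pos (a : Int) (t : List Int) (h : a ≠ -1) :
    dpxFindNext (a :: t) = a := by
  unfold dpxFindNext
  rw [List.find?_cons_of_pos (by simpa using h)]
  rfl

theorem findNext_blank (m : Nat) (l : List Int) :
    dpxFindNext (List.replicate m (-1) ++ l) = dpxFindNext l := by
  induction m with
  | zero => simp
  | succ m ih => rw [List.replicate_succ, List.cons_append, findNext_cons_neg, ih]

theorem drop_cons_getD (l : List Int) (p : Nat) (h : p < l.length) :
    l.drop p = l.getD p 0 :: l.drop (p + 1) := by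
  rw [List.drop_eq_getElem_cons h, List.getD_eq_getElem l 0 h]

theorem blank_shift (p : Nat) (t : List Int) :
    List.replicate p (-1 : Int) ++ (-1 :: t) = List.replicate (p + 1) (-1) ++ t := by
  simp [List.replicate_succ', List.append_assoc]

theorem blank_congr (l : List Int) (p m : Nat) (hpm : p ≤ m) (hm : m ≤ l.length)
    (h : ∀ k, p ≤ k → k < m → l.getD k 0 = -1) :
    List.replicate p (-1) ++ l.drop p = List.replicate m (-1) ++ l.drop m := by
  by_cases he : p = m
  · rw [he]
  · have hp : p < l.length := by omega
    rw [drop_cons_getD l p hp, h p le_rfl (by omega), blank_shift]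
    exact blank_congr l (p + 1) m (by omega) hm (fun k hk1 hk2 => h k (by omega) hk2)
termination_by m - p

theorem filter_drop_congr (l : List Int) (p m : Nat) (hpm : p ≤ m) (hm : m ≤ l.length)
    (h : ∀ k, p ≤ k → k < m → l.getD k 0 = -1) :
    (l.drop p).filter (fun v => v != -1) = (l.drop m).filter (fun v => v != -1) := by
  by_cases he : p = m
  · rw [he]
  · have hp : p < l.length := by omega
    rw [drop_cons_getD l p hp, h p le_rfl (by omega), List.filter_cons_of_neg (by simp)]
    exact filter_drop_congr l (p + 1) m (by omega) hm (fun k hk1 hk2 => h k (by omega) hk2)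
termination_by m - p

theorem findNext_drop_congr (l : List Int) (p m : Nat) (hpm : p ≤ m) (hm : m ≤ l.length)
    (h : ∀ k, p ≤ k → k < m → l.getD k 0 = -1) :
    dpxFindNext (l.drop p) = dpxFindNext (l.drop m) := by
  by_cases he : p = m
  · rw [he]
  · have hp : p < l.length := by omega
    rw [drop_cons_getD l p hp, h p le_rfl (by omega), findNext_cons_neg]
    exact findNext_drop_congr l (p + 1) m (by omega) hm (fun k hk1 hk2 => h k (by omega) hk2)
termination_by m - p

theorem index?_blank (m : Nat) (l : List Int) (v : Int) (hv : v ≠ -1) :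
    PySem.List.index? (List.replicate m (-1) ++ v :: l) v = some m := by
  induction m with
  | zero =>
    simpa using PySem.List.index?_cons_self v l
  | succ m ih =>
    rw [List.replicate_succ, List.cons_append,
      PySem.List.index?_cons_of_ne _ (fun he => hv he.symm), ih]
    rfl

theorem take_succ_getD (l : List Int) (i : Nat) (h : i < l.length) :
    l.take (i + 1) = l.take i ++ [l.getD i 0] := by
  rw [List.take_succ, List.getElem?_eq_getElem h, List.getD_eq_getElem l 0 h]
  rfl

theorem take_set_self (l : List Int) (i : Nat) (x : Int) (h : i < l.length) :
    (l.set i x).take (i + 1) = l.take i ++ [x] := by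
  rw [take_succ_getD _ i (by rw [List.length_set]; exact h)]
  rw [List.take_set, getD_set', if_pos ⟨rfl, h⟩]
  congr 1
  exact List.set_eq_of_length_le (by simp [Nat.min_le_left])

theorem drop_set_self (l : List Int) (i : Nat) (x : Int) :
    (l.set i x).drop (i + 1) = l.drop (i + 1) := by
  simp [List.drop_set]

theorem set_blank (m : Nat) (c : Int) (t : List Int) :
    (List.replicate m (-1 : Int) ++ c :: t).set m (-1) = List.replicate (m + 1) (-1) ++ t := by
  induction m with
  | zero => simp [List.replicate_succ]
  | succ m ih =>
    rw [List.replicate_succ, List.cons_append, List.set_cons_succ, ih,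
      ← List.cons_append, ← List.replicate_succ]

theorem fillB_cons_pos (c : Int) (cs fs : List Int) (h : c ≠ -1) :
    dpxFillB (c :: cs) fs = c :: dpxFillB cs fs := by simp [dpxFillB, h]

theorem fillB_cons_neg (cs : List Int) (f : Int) (fs : List Int) :
    dpxFillB ((-1) :: cs) (f :: fs) = f :: dpxFillB cs fs := by simp [dpxFillB]

theorem fillB_cons_nil (cs : List Int) :
    dpxFillB ((-1) :: cs) [] = (-1) :: dpxFillB cs [] := by simp [dpxFillB]

-- the core simulation: A's fill loop from index i with remaining stream (l.drop q)
theorem dpx_core (r1 r2 : List Int) (n : Nat) :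
    ∀ (i q : Nat) (ch : List Int), q ≤ r1.length → r1.length = ch.length →
      i + n = ch.length →
    ((List.range' i n).foldl dpxStep
        (ch, List.replicate q (-1) ++ r1.drop q, r2, dpxFindNext (r1.drop q))).1
      = ch.take i ++ dpxFillB (ch.drop i) ((r1.drop q).filter (fun v => v != -1)) := by
  induction n with
  | zero =>
    intro i q ch hq hlen hin
    have hdrop : ch.drop i = [] := List.drop_eq_nil_of_le (by omega)
    rw [List.range'_zero, List.foldl_nil, hdrop]
    show ch = ch.take i ++ []
    rw [List.append_nil, List.take_of_length_le (by omega)]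
  | succ n ih =>
    intro i q ch hq hlen hin
    have hi : i < ch.length := by omega
    rw [List.range'_succ, List.foldl_cons]
    have hdropi : ch.drop i = ch.getD i 0 :: ch.drop (i + 1) := drop_cons_getD ch i hi
    by_cases hhole : ch.getD i 0 = -1
    case neg =>
      have hstep : dpxStep (ch, List.replicate q (-1) ++ r1.drop q, r2, dpxFindNext (r1.drop q)) i
          = (ch, List.replicate q (-1) ++ r1.drop q, r2, dpxFindNext (r1.drop q)) := by
        unfold dpxStep
        dsimp only
        rw [if_neg (by simpa using hhole)]
      rw [hstep, ih (i + 1) q ch hq hlen (by omega)]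
      rw [hdropi]
      rw [fillB_cons_pos _ _ _ hhole, take_succ_getD ch i hi, List.append_assoc,
        List.singleton_append]
    case pos =>
      -- normalize the pointer q to the scan fixpoint m
      set m := dpxScan r1 q with hmdef
      have hqm : q ≤ m := scan_ge r1 q
      have hmle : m ≤ r1.length := scan_le r1 q hq
      have hmid : ∀ k, q ≤ k → k < m → r1.getD k 0 = -1 := scan_mid r1 q
      rw [blank_congr r1 q m hqm hmle hmid, filter_drop_congr r1 q m hqm hmle hmid,
        findNext_drop_congr r1 q m hqm hmle hmid]
      by_cases hm : m < r1.length
      · -- a real filler c = r1[m] is consumed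
        set c := r1.getD m 0 with hcdef
        have hc : c ≠ -1 := scan_stop r1 q hm
        have hdm : r1.drop m = c :: r1.drop (m + 1) := drop_cons_getD r1 m hm
        have hcur : dpxFindNext (r1.drop m) = c := by rw [hdm, findNext_cons_pos c _ hc]
        have hfs : (r1.drop m).filter (fun v => v != -1)
            = c :: (r1.drop (m + 1)).filter (fun v => v != -1) := by
          rw [hdm, List.filter_cons_of_pos (by simpa using hc)]
        have hset : (List.replicate m (-1) ++ r1.drop m).set m (-1)
            = List.replicate (m + 1) (-1) ++ r1.drop (m + 1) := by
          rw [hdm, set_blank]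
        have hstep : dpxStep (ch, List.replicate m (-1) ++ r1.drop m, r2, dpxFindNext (r1.drop m)) i
            = (ch.set i c, List.replicate (m + 1) (-1) ++ r1.drop (m + 1), r2,
               dpxFindNext (r1.drop (m + 1))) := by
          unfold dpxStep
          dsimp only
          rw [if_pos (by simpa using hhole), hcur]
          have hcont : (List.replicate m (-1) ++ r1.drop m).contains c = true := by
            rw [List.contains_iff_mem]
            rw [hdm]
            exact List.mem_append_right _ List.mem_cons_self
          rw [if_pos hcont]
          have hidx : PySem.List.index? (List.replicate m (-1) ++ r1.drop m) c = some m := by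
            rw [hdm]
            exact index?_blank m _ c hc
          rw [hidx]
          simp only [hset]
          rw [findNext_blank]
        rw [hstep, ih (i + 1) (m + 1) (ch.set i c) (by omega) (by rw [List.length_set]; exact hlen)
          (by rw [List.length_set]; omega)]
        rw [take_set_self ch i c hi, drop_set_self ch i c, hfs, hdropi, hhole]
        rw [fillB_cons_neg, List.append_assoc, List.singleton_append]
      · -- stream exhausted: m = r1.length, fill with -1
        have hmeq : m = r1.length := by omega
        have hdm : r1.drop m = [] := by rw [hmeq, List.drop_length]
        have hlen0 : 0 < r1.length := by omega
        have hrep : List.replicate m (-1 : Int) ++ r1.drop m = List.replicate m (-1) := by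
          rw [hdm, List.append_nil]
        have hrepcons : List.replicate m (-1 : Int) = -1 :: List.replicate (m - 1) (-1) := by
          conv_lhs => rw [show m = (m - 1) + 1 by omega]
          rw [List.replicate_succ]
        have hstep : dpxStep (ch, List.replicate m (-1) ++ r1.drop m, r2, dpxFindNext (r1.drop m)) i
            = (ch, List.replicate m (-1) ++ r1.drop m, r2, dpxFindNext (r1.drop m)) := by
          unfold dpxStep
          dsimp only
          rw [if_pos (by simpa using hhole)]
          rw [hrep, hdm, findNext_nil]
          have hcont : (List.replicate m (-1 : Int)).contains (-1) = true := by
            rw [List.contains_iff_mem, hrepcons]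
            exact List.mem_cons_self
          rw [if_pos hcont]
          have hidx : PySem.List.index? (List.replicate m (-1 : Int)) (-1) = some 0 := by
            rw [hrepcons]
            exact PySem.List.index?_cons_self _ _
          rw [hidx]
          have hsetid : (List.replicate m (-1 : Int)).set 0 (-1) = List.replicate m (-1) := by
            rw [hrepcons, List.set_cons_zero]
          simp only [hsetid]
          have hfn : dpxFindNext (List.replicate m (-1 : Int)) = -1 := by
            have := findNext_blank m ([] : List Int)
            rwa [List.append_nil] at this
          rw [hfn]
          have hchid : ch.set i (-1) = ch := by
            conv_lhs => rw [← hhole]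
            exact set_getD_self ch i hi
          rw [hchid]
        rw [hstep, ih (i + 1) m ch (by omega) hlen (by omega)]
        rw [hdropi, hhole, hdm]
        rw [show (([] : List Int).filter (fun v => v != -1)) = [] from rfl, fillB_cons_nil,
          take_succ_getD ch i hi, hhole, List.append_assoc, List.singleton_append]

theorem set_contains_eq (xs : List Int) (v : Int) :
    (PySem.Set.ofList xs).contains v = xs.contains v := by
  apply Bool.eq_iff_iff.mpr
  constructor
  · intro hx
    exact List.contains_iff_mem.mpr ((PySem.Set.mem_ofList xs v).mp (List.contains_iff_mem.mp hx))
  · intro hx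
    exact List.contains_iff_mem.mpr ((PySem.Set.mem_ofList xs v).mpr (List.contains_iff_mem.mp hx))

theorem filter_map_block (p1 : List Int) (child : List Int) :
    (p1.map (fun v => if child.contains v then -1 else v)).filter (fun v => v != -1)
      = p1.filter (fun v => v != -1 && !(child.contains v)) := by
  induction p1 with
  | nil => rfl
  | cons a t ih =>
    rw [List.map_cons]
    by_cases hc : child.contains a
    · have hmem : a ∈ child := List.contains_iff_mem.mp hc
      rw [if_pos hc, List.filter_cons_of_neg (by simp),
        List.filter_cons_of_neg (by simp [hmem]), ih]
    · rw [if_neg hc]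
      by_cases ha : a = -1
      · rw [List.filter_cons_of_neg (by simp [ha]),
          List.filter_cons_of_neg (by simp [ha]), ih]
      · have hnm : a ∉ child := fun hx => hc (List.contains_iff_mem.mpr hx)
        rw [List.filter_cons_of_pos (by simpa using ha),
          List.filter_cons_of_pos (by simp [ha, hnm]), ih]

-- ===== VERDICT (by name: the statement is the Claim_ definition above) =====
theorem dpx_spec : Claim_equal_dpx := by
  intro p1 p2 _hdom hpre
  unfold Spec_dpx dpx dpx_alt
  have hchild := child_eq p1 p2 hpre
  simp only [← hchild, set_contains_eq]
  set child := (dpxRuns p1 p2 p1.length 0).foldl (dpxFill p1)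
    (List.replicate p1.length (-1)) with hcdef
  have hclen : child.length = p1.length := by
    rw [hcdef, runs_length, List.length_replicate]
  set r1 := p1.map (fun v => if child.contains v then -1 else v) with hr1def
  set r2 := p2.map (fun v => if child.contains v then -1 else v) with hr2def
  have hr1len : r1.length = child.length := by rw [hr1def, List.length_map, hclen]
  have hcore := dpx_core r1 r2 p1.length 0 0 child (Nat.zero_le _) hr1len (by omega)
  rw [List.range_eq_range']
  simp only [List.replicate_zero, List.drop_zero, List.nil_append, List.take_zero] at hcore
  rw [hcore, hr1def, filter_map_block]
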